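-- pv_equiv track=rewrite | github.com/saplee/Python | KT/kt1/exam.py | has_seven
-- ===== SOURCE A (Python) =====
-- def has_seven(nums):
--     """
--     Given a list if ints, return True if the value 7 appears in the list exactly 3 times
--     and no consecutive elements have the same value.
--
--     has_seven([1, 2, 3]) => False
--     has_seven([7, 1, 7, 7]) => False
--     has_seven([7, 1, 7, 1, 7]) => True
--     has_seven([7, 1, 7, 1, 1, 7]) => False
--     """
--     new_number = []
--     result = 0
--     for number in nums:
--         if number == 7:
--             result += 1
--         if number in new_number:
--             return False
--         if number not in new_number:
--             new_number = [number]
--     if result == 3: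
--         return True
--     else:
--         return False
-- ===== SOURCE B (Python) =====
-- def has_seven(nums):
--     # Two independent passes: adjacent-duplicate scan, then count of 7s.
--     if any(a == b for a, b in zip(nums, nums[1:])):
--         return False
--     return nums.count(7) == 3
-- ===== Notes on version B (the rewrite author's own statement) =====
-- stated objective: simpler
-- what changed: Replaces A's single interleaved loop with mutable membership state and early returns by two independent passes: a zip-based adjacent-pair scan and list.count(7).
import Mathlib
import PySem

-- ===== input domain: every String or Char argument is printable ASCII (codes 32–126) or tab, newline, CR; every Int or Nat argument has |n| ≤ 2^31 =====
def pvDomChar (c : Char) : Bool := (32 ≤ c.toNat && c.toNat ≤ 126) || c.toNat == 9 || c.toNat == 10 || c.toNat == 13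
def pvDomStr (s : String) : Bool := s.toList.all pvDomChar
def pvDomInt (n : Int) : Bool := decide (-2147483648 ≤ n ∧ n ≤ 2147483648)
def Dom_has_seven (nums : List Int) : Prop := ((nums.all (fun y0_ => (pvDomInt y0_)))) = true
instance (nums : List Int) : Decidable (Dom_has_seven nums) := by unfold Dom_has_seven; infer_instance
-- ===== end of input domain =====

-- B recomputes A's result by two independent passes (adjacent-pair scan + count) instead of one interleaved loop.
-- ===== PORT A =====
-- A's for-loop with state (new_number, result) and early 'return False'
def has_seven_loop : List Int → List Int → Int → Bool
  | [], _, result => if result = 3 then true else false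
  | number :: rest, new_number, result =>
    let result := if number = 7 then result + 1 else result
    if new_number.contains number then false
    else has_seven_loop rest (if ¬ new_number.contains number then [number] else new_number) result

def has_seven (nums : List Int) : Bool := has_seven_loop nums [] 0

-- ===== PORT B =====
def has_seven_alt (nums : List Int) : Bool :=
  if (nums.zip nums.tail).any (fun p => p.1 == p.2) then false
  else PySem.List.count nums 7 == 3

-- ===== PRECONDITION & SPEC =====
def Spec_has_seven (nums : List Int) (out : Bool) : Prop := out = has_seven_alt nums
instance (nums : List Int) (out : Bool) : Decidable (Spec_has_seven nums out) := by unfold Spec_has_seven; infer_instance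

-- ===== CLAIM (what is proved, stated in full; the proofs are below) =====
def Claim_equal_has_seven : Prop := ∀ (nums : List Int), Dom_has_seven nums → Spec_has_seven nums (has_seven nums)

-- ===== LEMMAS AND PROOFS =====

-- loop invariant: with new_number = [p], A's loop computes "no adjacent dup in p::nums and result+count = 3"
theorem has_seven_loop_eq (nums : List Int) (p : Int) (r : Int) :
    has_seven_loop nums [p] r =
      (!((p :: nums).zip nums).any (fun q => q.1 == q.2) && (r + PySem.List.count nums 7 == 3)) := by
  induction nums generalizing p r with
  | nil =>
    simp only [has_seven_loop, PySem.List.count, List.count_nil, List.zip_nil_right,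
      List.any_nil, Bool.not_false, Bool.true_and, Nat.cast_zero, Int.add_zero]
    by_cases h : r = 3 <;> simp [h]
  | cons n rest ih =>
    rw [has_seven_loop]
    by_cases h : p = n
    · subst h
      have hcc : List.contains [p] p = true := by simp
      simp only [hcc, if_true, List.zip_cons_cons, List.any_cons, beq_self_eq_true,
        Bool.true_or, Bool.not_true, Bool.false_and]
    · have hc : List.contains [p] n = false := by
        simp only [List.contains_cons, List.contains_nil, Bool.or_false]
        exact beq_false_of_ne (fun e => h e.symm)
      have hbe' : (p == n) = false := beq_false_of_ne h
      simp only [hc, Bool.false_eq_true, if_false, not_false_eq_true, if_true, ih,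
        List.zip_cons_cons, List.any_cons, hbe', Bool.false_or, PySem.List.count,
        List.count_cons]
      by_cases h7 : n = 7
      · simp only [h7, beq_self_eq_true, if_true, Nat.cast_add, Nat.cast_one]
        have e : r + 1 + (List.count 7 rest : Int) = r + ((List.count 7 rest : Int) + 1) := by ring
        rw [e]
      · have h7b : (7 == n) = false := beq_false_of_ne (fun e => h7 e.symm)
        simp [h7, h7b]

-- ===== VERDICT (by name: the statement is the Claim_ definition above) =====
theorem has_seven_spec : Claim_equal_has_seven := by
  intro nums _
  unfold Spec_has_seven has_seven has_seven_alt
  cases nums with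
  | nil => simp [has_seven_loop, PySem.List.count]
  | cons n rest =>
    rw [has_seven_loop]
    simp only [List.contains_nil, Bool.false_eq_true, if_false, not_false_eq_true, if_true,
      has_seven_loop_eq, List.tail_cons, PySem.List.count, List.count_cons]
    cases hX : ((n :: rest).zip rest).any (fun q => q.1 == q.2) with
    | true => simp only [hX]; simp [hX]
    | false =>
      by_cases h7 : n = 7
      · simp only [h7, Bool.false_eq_true, if_false, beq_self_eq_true, if_true,
          Bool.not_false, Bool.true_and]
        rw [Bool.eq_iff_iff]
        simp only [beq_iff_eq]
        omega
      · have hb : (n == 7) = false := beq_false_of_ne h7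
        simp only [hb, Bool.false_eq_true, if_false, if_neg h7, Bool.not_false,
          Bool.true_and]
        rw [Bool.eq_iff_iff]
        simp only [beq_iff_eq]
        omega
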